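-- pv_equiv track=rewrite | github.com/p0ss/HatCatDev | scripts/ontology/build_v4_layers.py | compute_depths_bfs
-- ===== SOURCE A (Python) =====
-- from collections import defaultdict, deque
--
-- def compute_depths_bfs(parent_map, root):
--     """Compute minimum distance from root using BFS going upward."""
--     depths = {root: 0}
--     queue = deque([root])
--
--     while queue:
--         current = queue.popleft()
--         current_depth = depths[current]
--
--         # Find all children (concepts that have current as parent)
--         for child, parents in parent_map.items():
--             if current in parents and child not in depths:
--                 depths[child] = current_depth + 1
--                 queue.append(child)
--
--     return depths
-- ===== SOURCE B (Python) =====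
-- def compute_depths_bfs(parent_map, root):
--     """Compute minimum distance from root using BFS going upward.
--
--     Builds a reverse (parent -> children) index once, then expands the
--     search level by level with an explicit frontier list and depth counter.
--     """
--     children = {}
--     for child, parents in parent_map.items():
--         for p in dict.fromkeys(parents):
--             children.setdefault(p, []).append(child)
--
--     depths = {root: 0}
--     frontier = [root]
--     d = 0
--     while frontier:
--         d += 1
--         nxt = []
--         for cur in frontier:
--             for child in children.get(cur, []):
--                 if child not in depths:
--                     depths[child] = d
--                     nxt.append(child)
--         frontier = nxt
--     return depths
-- ===== Notes on version B (the rewrite author's own statement) =====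
-- stated objective: alternative
-- what changed: Instead of rescanning the entire parent_map for every dequeued node, B builds a reverse parent-to-children index once and then expands the search level by level (frontier list plus explicit depth counter, no deque and no per-node depth lookup).
import Mathlib
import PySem

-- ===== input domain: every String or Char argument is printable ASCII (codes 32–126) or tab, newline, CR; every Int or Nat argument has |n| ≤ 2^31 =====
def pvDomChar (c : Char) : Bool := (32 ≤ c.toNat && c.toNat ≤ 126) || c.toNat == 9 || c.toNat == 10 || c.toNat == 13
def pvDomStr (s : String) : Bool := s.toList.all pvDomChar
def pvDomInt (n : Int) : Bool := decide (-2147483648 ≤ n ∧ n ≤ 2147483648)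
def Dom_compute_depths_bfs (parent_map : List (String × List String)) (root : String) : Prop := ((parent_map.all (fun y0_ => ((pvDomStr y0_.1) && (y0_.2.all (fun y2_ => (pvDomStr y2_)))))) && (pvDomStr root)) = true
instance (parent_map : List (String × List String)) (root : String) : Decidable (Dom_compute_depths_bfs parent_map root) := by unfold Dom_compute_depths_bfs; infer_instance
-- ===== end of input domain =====

-- B replaces A's per-dequeued-node scan of the whole parent_map by a reverse (parent → children)
-- index built once, then a level-synchronous BFS over that index with an explicit depth counter
-- (objective: alternative).

-- ===== PORT A =====
-- one pass of A's inner "for child, parents in parent_map.items(): if current in parents and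
-- child not in depths: …" loop; the state is (depths, queue)
def pvScanA (items : List (String × List String)) (current : String) (d1 : Int)
    (st : PySem.Dict String Int × List String) : PySem.Dict String Int × List String :=
  items.foldl (fun st q =>
    if q.2.contains current && !(st.1.contains q.1) then
      (st.1.insert q.1 d1, st.2 ++ [q.1])
    else st) st

-- A's "while queue" loop.  fuel bounds the number of pops: every popped node was freshly
-- inserted into depths when enqueued, so parent_map.length + 1 pops are never exhausted on a
-- real run.  depths[current] always succeeds in the Python (a node is enqueued only when its
-- depth has just been set), so getD renders that lookup exactly.
def pvLoopA (items : List (String × List String)) :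
    Nat → PySem.Dict String Int → List String → PySem.Dict String Int
  | 0, depths, _ => depths
  | _ + 1, depths, [] => depths
  | fuel + 1, depths, current :: queue =>
    let st := pvScanA items current (depths.getD current 0 + 1) (depths, queue)
    pvLoopA items fuel st.1 st.2

def compute_depths_bfs (parent_map : List (String × List String)) (root : String) : List (String × Int) :=
  -- parent_map is a Python dict: normalize the association list the way dict() does
  (pvLoopA ((PySem.Dict.ofList parent_map).items) (parent_map.length + 1)
    ((PySem.Dict.empty).insert root 0) [root]).items

-- ===== PORT B =====
-- B's index build: for child, parents in parent_map.items():
--   for p in dict.fromkeys(parents): children.setdefault(p, []).append(child)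
def pvChildren (items : List (String × List String)) : PySem.Dict String (List String) :=
  items.foldl (fun d q =>
    (PySem.List.dedup q.2).foldl (fun d p => d.modify p [] (· ++ [q.1])) d)
    PySem.Dict.empty

-- one level of B: for cur in frontier: for child in children.get(cur, []): …; the state is (depths, nxt)
def pvLevel (children : PySem.Dict String (List String)) (d1 : Int)
    (frontier : List String) (depths : PySem.Dict String Int) :
    PySem.Dict String Int × List String :=
  frontier.foldl (fun st cur =>
    (children.getD cur []).foldl (fun st child =>
      if st.1.contains child then st
      else (st.1.insert child d1, st.2 ++ [child])) st) (depths, [])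

-- B's "while frontier" loop with its explicit depth counter d; fuel bounds the number of
-- levels, which never exceeds parent_map.length + 1 (each later level holds fresh keys)
def pvLoopL (children : PySem.Dict String (List String)) :
    Nat → PySem.Dict String Int → List String → Int → PySem.Dict String Int
  | 0, depths, _, _ => depths
  | _ + 1, depths, [], _ => depths
  | fuel + 1, depths, frontier, d =>
    let st := pvLevel children (d + 1) frontier depths
    pvLoopL children fuel st.1 st.2 (d + 1)

def compute_depths_bfs_alt (parent_map : List (String × List String)) (root : String) : List (String × Int) :=
  (pvLoopL (pvChildren ((PySem.Dict.ofList parent_map).items)) (parent_map.length + 1)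
    ((PySem.Dict.empty).insert root 0) [root] 0).items

-- ===== PRECONDITION & SPEC =====
def Spec_compute_depths_bfs (parent_map : List (String × List String)) (root : String) (out : List (String × Int)) : Prop := out = compute_depths_bfs_alt parent_map root
instance (parent_map : List (String × List String)) (root : String) (out : List (String × Int)) : Decidable (Spec_compute_depths_bfs parent_map root out) := by unfold Spec_compute_depths_bfs; infer_instance

-- ===== CLAIM (what is proved, stated in full; the proofs are below) =====
def Claim_equal_compute_depths_bfs : Prop := ∀ (parent_map : List (String × List String)) (root : String), Dom_compute_depths_bfs parent_map root → Spec_compute_depths_bfs parent_map root (compute_depths_bfs parent_map root)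

-- ===== LEMMAS AND PROOFS =====

-- proof-side FIFO BFS over the reverse index: the intermediate program between A and B.
-- pvScanF is the common per-node scan (literally B's inner fold, A's scan after indexing).
def pvScanF (childs : List String) (d1 : Int)
    (st : PySem.Dict String Int × List String) : PySem.Dict String Int × List String :=
  childs.foldl (fun st child =>
    if st.1.contains child then st
    else (st.1.insert child d1, st.2 ++ [child])) st

def pvLoopF (children : PySem.Dict String (List String)) :
    Nat → PySem.Dict String Int → List String → PySem.Dict String Int
  | 0, depths, _ => depths
  | _ + 1, depths, [] => depths
  | fuel + 1, depths, cur :: queue =>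
    let st := pvScanF (children.getD cur []) (depths.getD cur 0 + 1) (depths, queue)
    pvLoopF children fuel st.1 st.2

-- ---- step 1: A = FIFO over the reverse index ----

-- one item's contribution to the reverse index: its key appended under cur iff cur is a parent
theorem pvChildren_step_getD (d : PySem.Dict String (List String))
    (q : String × List String) (cur : String) :
    ((PySem.List.dedup q.2).foldl (fun d p => d.modify p [] (· ++ [q.1])) d).getD cur []
      = d.getD cur [] ++ (if cur ∈ q.2 then [q.1] else []) := by
  have hm : ((PySem.List.dedup q.2).map (fun p => (p, q.1))).foldl
      (fun d (p : String × String) => d.modify p.1 [] (· ++ [p.2])) d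
      = (PySem.List.dedup q.2).foldl (fun d p => d.modify p [] (· ++ [q.1])) d :=
    by rw [List.foldl_map]
  rw [← hm, PySem.Dict.getD_foldl_modify_append]
  congr 1
  rw [List.filter_map]
  by_cases hmem : cur ∈ q.2
  · have h1 : (PySem.List.dedup q.2).filter
        ((fun p : String × String => p.1 == cur) ∘ (fun p => (p, q.1))) = [cur] := by
      have h2 : (PySem.List.dedup q.2).filter (fun p => p == cur) = [cur] := by
        rw [List.filter_beq, List.count_eq_one_of_mem (PySem.List.nodup_dedup q.2)
              ((PySem.List.mem_dedup q.2 cur).mpr hmem)]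
        rfl
      simpa using h2
    rw [h1]
    simp [hmem]
  · have h1 : (PySem.List.dedup q.2).filter
        ((fun p : String × String => p.1 == cur) ∘ (fun p => (p, q.1))) = [] := by
      have h2 : (PySem.List.dedup q.2).filter (fun p => p == cur) = [] := by
        rw [List.filter_beq, List.count_eq_zero_of_not_mem
              (fun h => hmem ((PySem.List.mem_dedup q.2 cur).mp h))]
        rfl
      simpa using h2
    rw [h1]
    simp [hmem]

-- the reverse-index build, from any accumulator
theorem pvChildren_go_getD (items : List (String × List String))
    (d : PySem.Dict String (List String)) (cur : String) :
    (items.foldl (fun d q =>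
        (PySem.List.dedup q.2).foldl (fun d p => d.modify p [] (· ++ [q.1])) d) d).getD cur []
      = d.getD cur [] ++ (items.filter (fun q => q.2.contains cur)).map (·.1) := by
  induction items generalizing d with
  | nil => simp
  | cons q rest ih =>
    rw [List.foldl_cons, ih, pvChildren_step_getD, List.filter_cons]
    by_cases hmem : cur ∈ q.2
    · rw [if_pos hmem, if_pos (by simpa using hmem)]
      simp
    · rw [if_neg hmem, if_neg (by simpa using hmem)]
      simp

-- B's reverse index at cur lists exactly the keys whose parents contain cur, in item order
theorem pvChildren_getD (items : List (String × List String)) (cur : String) :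
    (pvChildren items).getD cur []
      = (items.filter (fun q => q.2.contains cur)).map (·.1) := by
  unfold pvChildren
  rw [pvChildren_go_getD]
  simp [PySem.Dict.getD_empty]

-- A's scan over the whole map from any state equals the scan over that reverse-index entry
theorem pvScan_eq (items : List (String × List String)) (cur : String) (d1 : Int)
    (st : PySem.Dict String Int × List String) :
    pvScanA items cur d1 st
      = pvScanF ((items.filter (fun q => q.2.contains cur)).map (·.1)) d1 st := by
  induction items generalizing st with
  | nil => rfl
  | cons q rest ih =>
    unfold pvScanA pvScanF
    rw [List.foldl_cons, List.filter_cons]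
    by_cases hc : q.2.contains cur = true
    · rw [if_pos hc, List.map_cons, List.foldl_cons, hc, Bool.true_and]
      by_cases hv : st.1.contains q.1 = true
      · rw [hv]
        simp only [Bool.not_true, reduceIte]
        exact ih st
      · rw [Bool.not_eq_true] at hv
        rw [hv]
        simp only [Bool.not_false, reduceIte]
        exact ih _
    · rw [Bool.not_eq_true] at hc
      rw [if_neg (by rw [hc]; exact Bool.false_ne_true), hc]
      exact ih st

-- A's while-loop coincides with the FIFO-over-index loop from any state
theorem pvLoop_eq (items : List (String × List String)) (fuel : Nat)
    (depths : PySem.Dict String Int) (queue : List String) :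
    pvLoopA items fuel depths queue = pvLoopF (pvChildren items) fuel depths queue := by
  induction fuel generalizing depths queue with
  | zero => rfl
  | succ n ih =>
    cases queue with
    | nil => rfl
    | cons cur rest =>
      unfold pvLoopA pvLoopF
      rw [pvScan_eq, ← pvChildren_getD]
      exact ih _ _

-- ---- step 2: FIFO over the index = level-synchronous over the index ----

-- number of still-undiscovered keys among a fixed key universe K
def pvUnvis (K : Finset String) (D : PySem.Dict String Int) : Nat :=
  (K.filter (fun k => D.contains k = false)).card

theorem pvLoopF_nil (ch : PySem.Dict String (List String)) (fuel : Nat)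
    (D : PySem.Dict String Int) : pvLoopF ch fuel D [] = D := by
  cases fuel <;> rfl

theorem pvLoopL_nil (ch : PySem.Dict String (List String)) (fuel : Nat)
    (D : PySem.Dict String Int) (d : Int) : pvLoopL ch fuel D [] d = D := by
  cases fuel <;> rfl

-- the scan never touches an already-recorded depth
theorem pvScanF_get? (cs : List String) (d1 : Int)
    (st : PySem.Dict String Int × List String) (x : String) (v : Int)
    (h : st.1.get? x = some v) : (pvScanF cs d1 st).1.get? x = some v := by
  induction cs generalizing st with
  | nil => exact h
  | cons c rest ih =>
    unfold pvScanF
    rw [List.foldl_cons]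
    by_cases hc : st.1.contains c = true
    · rw [hc]
      exact ih st h
    · rw [Bool.not_eq_true] at hc
      rw [hc]
      simp only [Bool.false_eq_true, reduceIte]
      refine ih _ ?_
      have hcx : st.1.contains x = true := by
        rw [PySem.Dict.contains_eq_isSome_get?, h]
        rfl
      have hne : x ≠ c := fun e => by rw [e, hc] at hcx; exact Bool.false_ne_true hcx
      simpa [PySem.Dict.get?_insert_of_ne st.1 d1 hne] using h

-- every node the scan has queued carries depth d1
theorem pvScanF_snd_get? (cs : List String) (d1 : Int)
    (st : PySem.Dict String Int × List String)
    (h : ∀ x ∈ st.2, st.1.get? x = some d1) :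
    ∀ x ∈ (pvScanF cs d1 st).2, (pvScanF cs d1 st).1.get? x = some d1 := by
  induction cs generalizing st with
  | nil => exact h
  | cons c rest ih =>
    unfold pvScanF
    rw [List.foldl_cons]
    by_cases hc : st.1.contains c = true
    · rw [hc]
      exact ih st h
    · rw [Bool.not_eq_true] at hc
      rw [hc]
      simp only [Bool.false_eq_true, reduceIte]
      refine ih _ ?_
      intro x hx
      rcases List.mem_append.mp hx with hx2 | hx2
      · have hcx : st.1.contains x = true := by
          rw [PySem.Dict.contains_eq_isSome_get?, h x hx2]
          rfl
        have hne : x ≠ c := fun e => by rw [e, hc] at hcx; exact Bool.false_ne_true hcx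
        simpa [PySem.Dict.get?_insert_of_ne st.1 d1 hne] using h x hx2
      · rw [List.mem_singleton.mp hx2]
        exact PySem.Dict.get?_insert_self st.1 c d1

-- a queue prefix is inert: the scan only appends at the end
theorem pvScanF_append (cs : List String) (d1 : Int) (D : PySem.Dict String Int)
    (q1 q2 : List String) :
    pvScanF cs d1 (D, q1 ++ q2)
      = ((pvScanF cs d1 (D, q2)).1, q1 ++ (pvScanF cs d1 (D, q2)).2) := by
  induction cs generalizing D q2 with
  | nil => rfl
  | cons c rest ih =>
    unfold pvScanF
    rw [List.foldl_cons, List.foldl_cons]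
    by_cases hc : D.contains c = true
    · rw [hc]
      exact ih D q2
    · rw [Bool.not_eq_true] at hc
      rw [hc]
      simp only [Bool.false_eq_true, reduceIte, List.append_assoc]
      exact ih _ _

-- inserting a fresh key of K shrinks the undiscovered set by one
theorem pvUnvis_insert (K : Finset String) (D : PySem.Dict String Int)
    (c : String) (v : Int) (hK : c ∈ K) (hD : D.contains c = false) :
    pvUnvis K (D.insert c v) + 1 = pvUnvis K D := by
  unfold pvUnvis
  have hset : K.filter (fun k => (D.insert c v).contains k = false)
      = (K.filter (fun k => D.contains k = false)).erase c := by
    ext k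
    simp only [Finset.mem_filter, Finset.mem_erase, PySem.Dict.contains_insert,
      Bool.or_eq_false_iff, beq_eq_false_iff_ne]
    tauto
  have hmem : c ∈ K.filter (fun k => D.contains k = false) :=
    Finset.mem_filter.mpr ⟨hK, hD⟩
  rw [hset, Finset.card_erase_of_mem hmem]
  have := Finset.card_pos.mpr ⟨c, hmem⟩
  omega

-- the scan's measure: queue length + undiscovered count never grows
theorem pvScanF_measure (K : Finset String) (cs : List String) (d1 : Int)
    (st : PySem.Dict String Int × List String) (hcs : ∀ x ∈ cs, x ∈ K) :
    (pvScanF cs d1 st).2.length + pvUnvis K (pvScanF cs d1 st).1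
      ≤ st.2.length + pvUnvis K st.1 := by
  induction cs generalizing st with
  | nil => exact Nat.le_refl _
  | cons c rest ih =>
    have hcK : c ∈ K := hcs c (List.mem_cons_self)
    have hrest : ∀ x ∈ rest, x ∈ K := fun x hx => hcs x (List.mem_cons_of_mem c hx)
    unfold pvScanF
    rw [List.foldl_cons]
    by_cases hc : st.1.contains c = true
    · rw [hc]
      exact ih st hrest
    · rw [Bool.not_eq_true] at hc
      rw [hc]
      simp only [Bool.false_eq_true, reduceIte]
      refine le_trans (ih _ hrest) ?_
      simp only [List.length_append, List.length_singleton]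
      have := pvUnvis_insert K st.1 c d1 hcK hc
      omega

-- processing one whole level in the FIFO loop = one pvLevel step
theorem pvLoopF_level (ch : PySem.Dict String (List String)) (frontier : List String)
    (fuel : Nat) (D : PySem.Dict String Int) (acc : List String) (d : Int)
    (h : ∀ x ∈ frontier, D.get? x = some d) :
    pvLoopF ch (fuel + frontier.length) D (frontier ++ acc)
      = pvLoopF ch fuel
          (frontier.foldl (fun st cur => pvScanF (ch.getD cur []) (d + 1) st) (D, acc)).1
          (frontier.foldl (fun st cur => pvScanF (ch.getD cur []) (d + 1) st) (D, acc)).2 := by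
  induction frontier generalizing D acc with
  | nil => simp
  | cons cur fr ih =>
    have hd : D.getD cur 0 = d := by
      rw [PySem.Dict.getD_eq_get?_getD, h cur List.mem_cons_self]
      rfl
    have hfr : ∀ x ∈ fr, D.get? x = some d := fun x hx => h x (List.mem_cons_of_mem cur hx)
    show pvLoopF ch ((fuel + fr.length) + 1) D (cur :: (fr ++ acc)) = _
    rw [show pvLoopF ch ((fuel + fr.length) + 1) D (cur :: (fr ++ acc))
          = pvLoopF ch (fuel + fr.length)
              (pvScanF (ch.getD cur []) (D.getD cur 0 + 1) (D, fr ++ acc)).1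
              (pvScanF (ch.getD cur []) (D.getD cur 0 + 1) (D, fr ++ acc)).2 from rfl]
    rw [hd, pvScanF_append]
    rw [ih _ _ (fun x hx => pvScanF_get? _ _ (D, acc) x d (hfr x hx))]
    simp [List.foldl_cons]

-- the per-level fold preserves recorded depths, gives every queued node depth d1,
-- and never increases the (queue length + undiscovered) measure
theorem pvLevelFold_snd (ch : PySem.Dict String (List String)) (d1 : Int)
    (frontier : List String) (st : PySem.Dict String Int × List String)
    (h : ∀ x ∈ st.2, st.1.get? x = some d1) :
    ∀ x ∈ (frontier.foldl (fun st cur => pvScanF (ch.getD cur []) d1 st) st).2,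
      (frontier.foldl (fun st cur => pvScanF (ch.getD cur []) d1 st) st).1.get? x = some d1 := by
  induction frontier generalizing st with
  | nil => exact h
  | cons cur fr ih =>
    rw [List.foldl_cons]
    exact ih _ (pvScanF_snd_get? _ _ st h)

theorem pvLevelFold_measure (K : Finset String) (ch : PySem.Dict String (List String))
    (d1 : Int) (hch : ∀ cur, ∀ x ∈ ch.getD cur [], x ∈ K) (frontier : List String)
    (st : PySem.Dict String Int × List String) :
    (frontier.foldl (fun st cur => pvScanF (ch.getD cur []) d1 st) st).2.length
        + pvUnvis K (frontier.foldl (fun st cur => pvScanF (ch.getD cur []) d1 st) st).1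
      ≤ st.2.length + pvUnvis K st.1 := by
  induction frontier generalizing st with
  | nil => exact Nat.le_refl _
  | cons cur fr ih =>
    rw [List.foldl_cons]
    exact le_trans (ih _) (pvScanF_measure K _ d1 st (hch cur))

theorem pvLevel_eq_foldl (ch : PySem.Dict String (List String)) (d1 : Int)
    (frontier : List String) (D : PySem.Dict String Int) :
    frontier.foldl (fun st cur => pvScanF (ch.getD cur []) d1 st) (D, ([] : List String))
      = pvLevel ch d1 frontier D := rfl

-- the FIFO loop and the level loop agree whenever both have sufficient fuel
theorem pvSim (K : Finset String) (ch : PySem.Dict String (List String))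
    (hch : ∀ cur, ∀ x ∈ ch.getD cur [], x ∈ K) (lf : Nat) :
    ∀ (D : PySem.Dict String Int) (frontier : List String) (d : Int),
    (∀ x ∈ frontier, D.get? x = some d) →
    pvUnvis K D + (if frontier = [] then 0 else 1) ≤ lf →
    ∀ ff, frontier.length + pvUnvis K D ≤ ff →
    pvLoopF ch ff D frontier = pvLoopL ch lf D frontier d := by
  induction lf with
  | zero =>
    intro D frontier d h hlf ff hff
    cases frontier with
    | nil => rw [pvLoopF_nil, pvLoopL_nil]
    | cons cur fr =>
      rw [if_neg (List.cons_ne_nil cur fr)] at hlf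
      omega
  | succ n ih =>
    intro D frontier d h hlf ff hff
    cases frontier with
    | nil => rw [pvLoopF_nil, pvLoopL_nil]
    | cons cur fr =>
      rw [if_neg (List.cons_ne_nil cur fr)] at hlf
      have hlen : (cur :: fr).length ≤ ff := le_trans (Nat.le_add_right _ _) hff
      obtain ⟨f0, rfl⟩ : ∃ f0, ff = f0 + (cur :: fr).length :=
        ⟨ff - (cur :: fr).length, (Nat.sub_add_cancel hlen).symm⟩
      have hLevel := pvLoopF_level ch (cur :: fr) f0 D [] d h
      rw [List.append_nil, pvLevel_eq_foldl] at hLevel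
      rw [hLevel]
      rw [show pvLoopL ch (n + 1) D (cur :: fr) d
            = pvLoopL ch n (pvLevel ch (d + 1) (cur :: fr) D).1
                (pvLevel ch (d + 1) (cur :: fr) D).2 (d + 1) from rfl]
      have hm := pvLevelFold_measure K ch (d + 1) hch (cur :: fr) (D, [])
      rw [pvLevel_eq_foldl] at hm
      simp only [List.length_nil, Nat.zero_add] at hm
      have hsnd := pvLevelFold_snd ch (d + 1) (cur :: fr) (D, [])
        (by intro x hx; cases hx)
      rw [pvLevel_eq_foldl] at hsnd
      refine ih _ _ _ hsnd ?_ f0 ?_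
      · by_cases hnil : (pvLevel ch (d + 1) (cur :: fr) D).2 = []
        · rw [if_pos hnil]
          rw [hnil] at hm
          simp only [List.length_nil, Nat.zero_add] at hm
          omega
        · rw [if_neg hnil]
          have h1 : 1 ≤ (pvLevel ch (d + 1) (cur :: fr) D).2.length :=
            Nat.pos_of_ne_zero (fun e => hnil (List.length_eq_zero_iff.mp e))
          omega
      · simp only [List.length_cons] at hff
        omega

-- every child in the reverse index is a key of items
theorem pvChildren_mem_keys (items : List (String × List String)) :
    ∀ cur, ∀ x ∈ (pvChildren items).getD cur [],
      x ∈ (items.map Prod.fst).toFinset := by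
  intro cur x hx
  rw [pvChildren_getD] at hx
  obtain ⟨q, hq, rfl⟩ := List.mem_map.mp hx
  exact List.mem_toFinset.mpr (List.mem_map.mpr ⟨q, List.mem_of_mem_filter hq, rfl⟩)

-- dict(parent_map) has at most parent_map.length items
theorem pvUpdate_size_le (l : List (String × List String))
    (d : PySem.Dict String (List String)) :
    (d.update l).items.length ≤ d.items.length + l.length := by
  induction l generalizing d with
  | nil => simp [PySem.Dict.update]
  | cons p rest ih =>
    have h1 := ih (d.insert p.1 p.2)
    have h2 : ((d.insert p.1 p.2).items).length ≤ d.items.length + 1 := by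
      have := PySem.Dict.size_insert d p.1 p.2
      unfold PySem.Dict.size at this
      rw [this]
      split_ifs <;> omega
    calc ((d.update (p :: rest)).items).length
        = (((d.insert p.1 p.2).update rest).items).length := rfl
      _ ≤ ((d.insert p.1 p.2).items).length + rest.length := ih _
      _ ≤ d.items.length + 1 + rest.length := by omega
      _ = d.items.length + (p :: rest).length := by simp [List.length_cons]; omega

-- the initial undiscovered count is at most parent_map.length
theorem pvStart_bound (parent_map : List (String × List String)) (root : String) :
    pvUnvis (((PySem.Dict.ofList parent_map).items.map Prod.fst).toFinset)
      ((PySem.Dict.empty).insert root 0) ≤ parent_map.length := by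
  refine le_trans (Finset.card_filter_le _ _) ?_
  refine le_trans (List.toFinset_card_le _) ?_
  rw [List.length_map]
  have h1 := pvUpdate_size_le parent_map PySem.Dict.empty
  have h0 : (PySem.Dict.empty : PySem.Dict String (List String)).items.length = 0 := rfl
  unfold PySem.Dict.ofList
  omega

-- ===== VERDICT (by name: the statement is the Claim_ definition above) =====
theorem compute_depths_bfs_spec : Claim_equal_compute_depths_bfs := by
  intro parent_map root _
  unfold Spec_compute_depths_bfs compute_depths_bfs compute_depths_bfs_alt
  rw [pvLoop_eq]
  congr 1
  exact pvSim (((PySem.Dict.ofList parent_map).items.map Prod.fst).toFinset) _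
    (pvChildren_mem_keys _) (parent_map.length + 1)
    _ [root] 0
    (by
      intro x hx
      rw [List.mem_singleton.mp hx]
      exact PySem.Dict.get?_insert_self _ _ _)
    (by
      have := pvStart_bound parent_map root
      simp only [reduceIte, List.cons_ne_nil]
      omega)
    (parent_map.length + 1)
    (by
      have := pvStart_bound parent_map root
      simp only [List.length_singleton]
      omega)
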